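-- pv_equiv track=rewrite | github.com/danishmustafa86/Leetcode_Problems_Solutions | 2219-maximum-number-of-words-found-in-sentences/maximum-number-of-words-found-in-sentences.py | mostWordsFound
-- ===== SOURCE A (Python) =====
-- from typing import List
--
-- def mostWordsFound(sentences: List[str]) -> int:
--     n = 0
--     Max = 0
--     for i in sentences:
--         lst = list(i)
--         n = 0
--         for j in i:
--             if j == " ":
--                 n += 1
--         Max = max(n,Max)
--     return Max+1
-- ===== SOURCE B (Python) =====
-- def mostWordsFound(sentences):
--     return max((len(s.split(' ')) for s in sentences), default=1)
-- ===== Notes on version B (the rewrite author's own statement) =====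
-- stated objective: idiomatic
-- what changed: Replaces the nested character loop that counts spaces per sentence (plus an unused list(i) copy and leaked loop state) with a one-line max over per-sentence token counts len(s.split(' ')), default=1 for the empty list.
import Mathlib
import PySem

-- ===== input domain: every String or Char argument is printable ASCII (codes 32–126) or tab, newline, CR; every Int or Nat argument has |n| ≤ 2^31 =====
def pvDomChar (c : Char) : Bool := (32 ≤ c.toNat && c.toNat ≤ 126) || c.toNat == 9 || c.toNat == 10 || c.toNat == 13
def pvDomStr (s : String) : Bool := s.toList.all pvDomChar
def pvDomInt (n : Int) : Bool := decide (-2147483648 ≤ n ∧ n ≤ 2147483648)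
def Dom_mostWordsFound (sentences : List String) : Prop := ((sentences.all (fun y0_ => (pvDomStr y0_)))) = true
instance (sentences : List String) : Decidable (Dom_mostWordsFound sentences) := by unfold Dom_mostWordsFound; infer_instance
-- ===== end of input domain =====

-- B replaces A's nested space-counting loop by the idiomatic max of per-sentence len(s.split(' ')) with default=1; same cost.

-- ===== PORT A =====
-- literal port: fold over sentences carrying (n, Max); inner char loop counts spaces; lst is built and unused, as in A
def mostWordsFound (sentences : List String) : Int :=
  let p := sentences.foldl (fun (p : Int × Int) i =>
    let _lst := i.toList
    let n := i.toList.foldl (fun n j => if j == ' ' then n + 1 else n) (0 : Int)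
    (n, max n p.2)) ((0 : Int), (0 : Int))
  p.2 + 1

-- ===== PORT B =====
-- len(s.split(' ')) = (PySem.Chars.splitOn s.toList [' ']).length (sep is the nonempty literal ' '); max(…, default=1)
def mostWordsFound_alt (sentences : List String) : Int :=
  match PySem.List.max? (sentences.map (fun s => ((PySem.Chars.splitOn s.toList [' ']).length : Int))) (fun x => x) with
  | some m => m
  | none => 1

-- ===== PRECONDITION & SPEC =====
def Spec_mostWordsFound (sentences : List String) (out : Int) : Prop := out = mostWordsFound_alt sentences
instance (sentences : List String) (out : Int) : Decidable (Spec_mostWordsFound sentences out) := by unfold Spec_mostWordsFound; infer_instance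

-- ===== CLAIM (what is proved, stated in full; the proofs are below) =====
def Claim_equal_mostWordsFound : Prop := ∀ (sentences : List String), Dom_mostWordsFound sentences → Spec_mostWordsFound sentences (mostWordsFound sentences)

-- ===== LEMMAS AND PROOFS =====

-- splitting on a single char yields (count of that char) + 1 pieces
theorem splitOn_go_space_length (fuel : Nat) (l cur : List Char) (acc : List (List Char))
    (h : l.length ≤ fuel) :
    (PySem.Chars.splitOn.go [' '] fuel l cur acc).length = acc.length + 1 + l.count ' ' := by
  induction fuel generalizing l cur acc with
  | zero =>
    have : l = [] := List.eq_nil_of_length_eq_zero (Nat.le_zero.mp h)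
    subst this
    simp [PySem.Chars.splitOn.go]
  | succ fuel ih =>
    cases l with
    | nil => simp [PySem.Chars.splitOn.go]
    | cons c rest =>
      by_cases hc : c = ' '
      · subst hc
        have hp : List.isPrefixOf [' '] (' ' :: rest) = true := by simp [List.isPrefixOf]
        simp only [PySem.Chars.splitOn.go, hp, if_true, List.length_cons, List.drop_succ_cons,
          List.length_nil, List.drop_zero]
        rw [ih rest [] (cur.reverse :: acc) (by simp at h; omega)]
        simp
        omega
      · have hp : List.isPrefixOf [' '] (c :: rest) = false := by
          simp only [List.isPrefixOf, Bool.and_eq_false_iff, beq_eq_false_iff_ne, ne_eq]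
          exact Or.inl fun e => hc e.symm
        simp only [PySem.Chars.splitOn.go, hp, Bool.false_eq_true, if_false]
        rw [ih rest (c :: cur) acc (by simp at h; omega)]
        simp [hc]

theorem splitOn_space_length (cs : List Char) :
    (PySem.Chars.splitOn cs [' ']).length = cs.count ' ' + 1 := by
  unfold PySem.Chars.splitOn
  rw [splitOn_go_space_length (cs.length + 1) cs [] [] (Nat.le_succ _)]
  simp
  omega

-- the pair fold's second component is the plain running max of space counts
theorem foldA_snd (l : List String) (p : Int × Int) :
    (l.foldl (fun (p : Int × Int) i =>
      let _lst := i.toList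
      let n := i.toList.foldl (fun n j => if j == ' ' then n + 1 else n) (0 : Int)
      (n, max n p.2)) p).2
    = l.foldl (fun M i => max ((i.toList.count ' ' : Int)) M) p.2 := by
  induction l generalizing p with
  | nil => rfl
  | cons s t ih =>
    simp only [List.foldl_cons]
    rw [ih]
    congr 1
    rw [PySem.List.foldl_beq_add_one]
    simp

-- running max of counts + 1 = running max of (count+1)
theorem foldMax_succ (t : List String) (a : Int) :
    t.foldl (fun M i => max ((i.toList.count ' ' : Int)) M) a + 1
    = (t.map (fun s => ((s.toList.count ' ' : Int) + 1))).foldl max (a + 1) := by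
  induction t generalizing a with
  | nil => rfl
  | cons s t ih =>
    simp only [List.foldl_cons, List.map_cons]
    rw [ih]
    congr 1
    omega

-- ===== VERDICT (by name: the statement is the Claim_ definition above) =====
theorem mostWordsFound_spec : Claim_equal_mostWordsFound := by
  intro sentences _
  show mostWordsFound sentences = mostWordsFound_alt sentences
  unfold mostWordsFound mostWordsFound_alt
  cases sentences with
  | nil => rfl
  | cons s t =>
    have hmap : (s :: t).map (fun x => ((PySem.Chars.splitOn x.toList [' ']).length : Int))
        = ((s.toList.count ' ' : Int) + 1) :: t.map (fun x => ((x.toList.count ' ' : Int) + 1)) := by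
      simp [splitOn_space_length]
    rw [hmap, PySem.List.max?_id_cons]
    simp only [List.foldl_cons, foldA_snd]
    rw [PySem.List.foldl_beq_add_one, zero_add]
    have h0 : max ((s.toList.count ' ' : Int)) 0 = (s.toList.count ' ' : Int) :=
      max_eq_left (by positivity)
    rw [h0, foldMax_succ]
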